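-- pv_equiv track=rewrite | github.com/oscar-77777/11402_numerical | hw4/hw4_q3.py | simpson_weights
-- ===== SOURCE A (Python) =====
-- def simpson_weights(count):
--     if count % 2 != 0:
--         raise ValueError("n and m must be even.")
--     weights = [0] * (count + 1)
--     weights[0] = 1
--     weights[-1] = 1
--     for i in range(1, count):
--         weights[i] = 4 if i % 2 else 2
--     return weights
-- ===== SOURCE B (Python) =====
-- def simpson_weights(count):
--     if count % 2 != 0:
--         raise ValueError("n and m must be even.")
--     if count == 0:
--         return [1]
--     if count == 2:
--         return [1, 4, 1]
--     # composite Simpson rules are additive: glue the rules of the two halves,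
--     # merging the touching endpoint weights 1 + 1 into the interior weight 2
--     left = 2 * (count // 4)
--     right = count - left
--     a = simpson_weights(left)
--     b = simpson_weights(right)
--     return a[:-1] + [2] + b[1:]
-- ===== Notes on version B (the rewrite author's own statement) =====
-- stated objective: alternative
-- what changed: B computes the weight list by divide and conquer using additivity of composite Simpson rules -- split the panel count into two even halves, recurse, and glue the two weight lists with the touching endpoint weights 1+1 merged into the interior weight 2 -- instead of allocating a zero array and filling it with an index-parity loop.
import Mathlib
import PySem

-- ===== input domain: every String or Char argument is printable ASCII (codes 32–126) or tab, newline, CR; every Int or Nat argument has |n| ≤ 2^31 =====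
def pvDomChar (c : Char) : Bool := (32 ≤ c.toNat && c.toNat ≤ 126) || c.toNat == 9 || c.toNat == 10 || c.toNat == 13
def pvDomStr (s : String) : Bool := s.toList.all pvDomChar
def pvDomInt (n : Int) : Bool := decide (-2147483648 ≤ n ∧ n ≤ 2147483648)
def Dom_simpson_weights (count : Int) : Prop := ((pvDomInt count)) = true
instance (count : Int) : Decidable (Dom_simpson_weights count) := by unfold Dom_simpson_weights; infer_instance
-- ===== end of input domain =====

-- B computes the weights by divide and conquer (additivity of composite Simpson rules: glue the
-- two halves' weight lists, merging the touching endpoint 1s into the interior 2) instead of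
-- filling a zero array with an index-parity loop (objective: alternative; no speed claim).

-- ===== PORT A =====
def simpson_weights (count : Int) : List Int :=
  -- 'if count % 2 != 0: raise ValueError(...)' — those inputs are excluded by Pre_
  let w0 := List.replicate (count + 1).toNat (0 : Int)   -- weights = [0] * (count + 1)
  let w1 := w0.set 0 1                                   -- weights[0] = 1 (raises on empty list: outside Pre_)
  let w2 := w1.set (w1.length - 1) 1                     -- weights[-1] = 1; exact for nonempty lists (empty: outside Pre_)
  (PySem.List.pyRange 1 count).foldl
    (fun w i => PySem.List.pySetD w i (if PySem.Int.mod i 2 ≠ 0 then 4 else 2)) w2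

-- ===== PORT B =====
-- B's recursion, with a fuel parameter for Lean termination only: inside Pre_ the recursive
-- arguments are positive, even and strictly smaller, so fuel = count.toNat + 1 never runs out.
def swGo : Nat → Int → List Int
  | 0, _ => []                                           -- fuel exhausted (unreachable inside Pre_)
  | fuel + 1, count =>
    if count = 0 then [1]
    else if count = 2 then [1, 4, 1]
    else
      let left := 2 * PySem.Int.floordiv count 4
      let right := count - left
      -- a[:-1] → dropLast and b[1:] → drop 1 (exact slices on these lists)
      (swGo fuel left).dropLast ++ [2] ++ (swGo fuel right).drop 1

def simpson_weights_alt (count : Int) : List Int :=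
  -- parity guard ('raise ValueError') — those inputs are excluded by Pre_
  swGo (count.toNat + 1) count

-- ===== PRECONDITION & SPEC =====
-- Pre_ excludes exactly the inputs where A raises: odd counts (ValueError) and negative even counts (IndexError from weights[0] = 1 on an empty list).
def Pre_simpson_weights (count : Int) : Prop := PySem.Int.mod count 2 = 0 ∧ 0 ≤ count
instance (count : Int) : Decidable (Pre_simpson_weights count) := by unfold Pre_simpson_weights; infer_instance
def pvWitness_simpson_weights : Int := 4

def Spec_simpson_weights (count : Int) (out : List Int) : Prop := out = simpson_weights_alt count
instance (count : Int) (out : List Int) : Decidable (Spec_simpson_weights count out) := by unfold Spec_simpson_weights; infer_instance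

-- ===== CLAIM (what is proved, stated in full; the proofs are below) =====
def Claim_equal_simpson_weights : Prop := ∀ (count : Int), Dom_simpson_weights count → Pre_simpson_weights count → Spec_simpson_weights count (simpson_weights count)

-- ===== LEMMAS AND PROOFS =====

-- the value A's loop writes at index i
def pvF (i : Int) : Int := if PySem.Int.mod i 2 ≠ 0 then 4 else 2

-- A's loop: in-order sets over range(m, m+r) on a list whose slots m..m+r-1 are still 0
lemma pv_fold_sets (r : Nat) : ∀ (pre tl : List Int),
    (PySem.List.pyRange (pre.length : Int) ((pre.length + r : Nat) : Int)).foldl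
      (fun w i => PySem.List.pySetD w i (pvF i)) (pre ++ List.replicate r 0 ++ tl)
    = pre ++ (PySem.List.pyRange (pre.length : Int) ((pre.length + r : Nat) : Int)).map pvF ++ tl := by
  induction r with
  | zero =>
      intro pre tl
      have h : PySem.List.pyRange (pre.length : Int) ((pre.length + 0 : Nat) : Int) = [] := by
        simp [PySem.List.pyRange]
      rw [h]; simp
  | succ r ih =>
      intro pre tl
      have hlt : (pre.length : Int) < ((pre.length + (r+1) : Nat) : Int) := by omega
      rw [PySem.List.pyRange_one_cons hlt]
      have hset : PySem.List.pySetD (pre ++ List.replicate (r+1) (0:Int) ++ tl)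
          (pre.length : Int) (pvF pre.length)
          = (pre ++ [pvF (pre.length : Int)]) ++ List.replicate r 0 ++ tl := by
        rw [PySem.List.pySetD_natCast]
        simp [List.replicate_succ, List.set_append_right _ _ (le_refl pre.length)]
      have hcast : ((pre.length + (r+1) : Nat) : Int) = (((pre ++ [pvF (pre.length : Int)]).length + r : Nat) : Int) := by
        simp; omega
      have hcast2 : ((pre.length : Int) + 1) = ((pre ++ [pvF (pre.length : Int)]).length : Int) := by
        simp
      simp only [List.foldl_cons, hset]
      rw [hcast, hcast2, ih (pre ++ [pvF (pre.length : Int)]) tl]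
      simp [List.map_cons]

-- the interior values: map pvF over range(1, 2k+2) is (k copies of [4,2]) ++ [4]
lemma pv_map_interior (k : Nat) :
    (PySem.List.pyRange 1 ((2*k+2 : Nat) : Int)).map pvF
    = (List.replicate k ([4, 2] : List Int)).flatten ++ [4] := by
  induction k with
  | zero =>
      decide
  | succ k ih =>
      have h1 : ((2*(k+1)+2 : Nat) : Int) = ((2*k+3 : Nat) : Int) + 1 := by omega
      have h2 : ((2*k+3 : Nat) : Int) = ((2*k+2 : Nat) : Int) + 1 := by omega
      have hle2 : (1 : Int) ≤ ((2*k+2 : Nat) : Int) := by omega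
      have hle3 : (1 : Int) ≤ ((2*k+3 : Nat) : Int) := by omega
      rw [h1, PySem.List.pyRange_one_succ_right hle3, h2, PySem.List.pyRange_one_succ_right hle2]
      have hf2 : pvF ((2*k+2 : Nat) : Int) = 2 := by
        simp [pvF]
      have hf3 : pvF ((2*k+3 : Nat) : Int) = 4 := by
        simp [pvF]
      push_cast at ih hf2 hf3 ⊢
      have h23 : (2*(k:Int)+2+1) = 2*(k:Int)+3 := by ring
      simp [h23, ih, hf2, hf3, List.replicate_succ' (n := k)]

-- B's recursion computes the closed form whenever it has enough fuel
lemma swGo_correct : ∀ (fuel k : Nat), 2*k+2 ≤ fuel →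
    swGo fuel ((2*k+2 : Nat) : Int) = [1] ++ (List.replicate k ([4, 2] : List Int)).flatten ++ [4, 1] := by
  intro fuel
  induction fuel with
  | zero => intro k hk; omega
  | succ fuel ih =>
      intro k hk
      rcases Nat.eq_zero_or_pos k with h0 | hpos
      · subst h0
        simp [swGo]
      · -- count = 2k+2 ≥ 4: the divide-and-conquer branch
        have hne0 : ((2*k+2 : Nat) : Int) ≠ 0 := by push_cast; omega
        have hne2 : ((2*k+2 : Nat) : Int) ≠ 2 := by push_cast; omega
        -- left = 2*((2k+2)//4) = 2*((k+1)/2), an even count 2*(l-1)+2 with l = (k+1)/2 ≥ 1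
        set l : Nat := (k+1)/2 with hl
        have hfd : PySem.Int.floordiv ((2*k+2 : Nat) : Int) 4 = (l : Int) := by
          rw [PySem.Int.floordiv_eq_ediv_of_pos (by omega : (0:Int) < 4)]
          push_cast
          omega
        have hl1 : 1 ≤ l := by omega
        have hlk : l ≤ k := by omega
        have hleft : 2 * PySem.Int.floordiv ((2*k+2 : Nat) : Int) 4 = ((2*(l-1)+2 : Nat) : Int) := by
          rw [hfd]; push_cast; omega
        have hright : ((2*k+2 : Nat) : Int) - ((2*(l-1)+2 : Nat) : Int)
            = ((2*(k-l)+2 : Nat) : Int) := by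
          push_cast; omega
        have ihL := ih (l-1) (by omega)
        have ihR := ih (k-l) (by omega)
        show (if ((2*k+2 : Nat) : Int) = 0 then _ else _) = _
        rw [if_neg hne0, if_neg hne2]
        simp only [hleft]
        rw [hright, ihL, ihR]
        have hdrop : ([1] ++ (List.replicate (l-1) ([4,2] : List Int)).flatten ++ [4, 1]).dropLast
            = [1] ++ (List.replicate (l-1) ([4,2] : List Int)).flatten ++ [4] := by
          have : [1] ++ (List.replicate (l-1) ([4,2] : List Int)).flatten ++ [4, 1]
              = ([1] ++ (List.replicate (l-1) ([4,2] : List Int)).flatten ++ [4]) ++ [1] := by simp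
          rw [this, List.dropLast_concat]
        rw [hdrop]
        have hflat : (List.replicate (l-1) ([4,2] : List Int)).flatten ++ [4, 2]
              ++ (List.replicate (k-l) ([4,2] : List Int)).flatten
            = (List.replicate k ([4,2] : List Int)).flatten := by
          have hk' : (l-1) + 1 + (k-l) = k := by omega
          calc (List.replicate (l-1) ([4,2] : List Int)).flatten ++ [4, 2]
              ++ (List.replicate (k-l) ([4,2] : List Int)).flatten
              = (List.replicate (l-1) ([4,2] : List Int) ++ List.replicate 1 ([4,2] : List Int)
                  ++ List.replicate (k-l) ([4,2] : List Int)).flatten := by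
                simp [List.flatten_append]
            _ = (List.replicate k ([4,2] : List Int)).flatten := by
                rw [← List.replicate_add, ← List.replicate_add, hk']
        rw [← hflat]
        simp
-- ===== VERDICT (by name: the statement is the Claim_ definition above) =====
theorem simpson_weights_spec : Claim_equal_simpson_weights := by
  intro count _ hpre
  unfold Spec_simpson_weights
  obtain ⟨heven, hnn⟩ := hpre
  rcases eq_or_ne count 0 with h0 | h0
  · subst h0; decide
  · -- count is a positive even integer: count = 2*k + 2 for some k : Nat
    have hdvd : (2 : Int) ∣ count := (PySem.Int.mod_eq_zero_iff_dvd count 2).mp heven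
    obtain ⟨c, hc⟩ := hdvd
    have hk : ∃ k : Nat, count = ((2*k+2 : Nat) : Int) := by
      refine ⟨(c - 1).toNat, ?_⟩; push_cast; omega
    obtain ⟨k, hk⟩ := hk
    subst hk
    -- A's side
    have htoNat : ((((2*k+2 : Nat) : Int)) + 1).toNat = 2*k+3 := by omega
    have hA : simpson_weights ((2*k+2 : Nat) : Int)
        = [1] ++ (PySem.List.pyRange 1 ((2*k+2 : Nat) : Int)).map pvF ++ [1] := by
      show (PySem.List.pyRange 1 ((2*k+2 : Nat) : Int)).foldl
          (fun w i => PySem.List.pySetD w i (pvF i)) _ = _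
      have hw2 : ((List.replicate ((((2*k+2 : Nat) : Int)) + 1).toNat (0:Int)).set 0 1).set
            (((List.replicate ((((2*k+2 : Nat) : Int)) + 1).toNat (0:Int)).set 0 1).length - 1) 1
          = [1] ++ List.replicate (2*k+1) 0 ++ [1] := by
        rw [htoNat]
        have : List.replicate (2*k+3) (0:Int) = 0 :: (List.replicate (2*k+1) 0 ++ [0]) := by
          rw [show 2*k+3 = (2*k+2)+1 from rfl, List.replicate_succ,
              show 2*k+2 = (2*k+1)+1 from rfl, List.replicate_succ' (n := 2*k+1)]
        rw [this]
        simp only [List.set_cons_zero, List.length_cons, List.length_append,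
          List.length_replicate, List.length_cons, List.length_nil]
        have : (1:Int) :: (List.replicate (2*k+1) (0:Int) ++ [0])
            = ([1] ++ List.replicate (2*k+1) 0) ++ [0] := by simp
        rw [this, List.set_append_right _ _ (by simp)]
        simp
      rw [hw2]
      have hcnt : ((2*k+2 : Nat) : Int) = ((([(1:Int)]).length + (2*k+1) : Nat) : Int) := by
        simp only [List.length_cons, List.length_nil]; push_cast; omega
      rw [hcnt]
      exact pv_fold_sets (2*k+1) [1] [1]
    -- B's side
    have hB : simpson_weights_alt ((2*k+2 : Nat) : Int)
        = [1] ++ (List.replicate k ([4,2] : List Int)).flatten ++ [4, 1] := by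
      rw [simpson_weights_alt]
      have htn : (((2*k+2 : Nat) : Int)).toNat + 1 = 2*k+3 := by omega
      rw [htn]
      exact swGo_correct (2*k+3) k (by omega)
    rw [hA, hB, pv_map_interior k]
    simp
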